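-- pv_equiv track=rewrite | github.com/ethan-coe-renner/rna-reconstruction | rna.py | get_interior_vertices
-- ===== SOURCE A (Python) =====
-- def break_frag(frag, search):
--     fragments = [""]
--     c = 0
--     for singleteton in frag:
--         fragments[c] += singleteton
--         if singleteton in search:
--             c += 1
--             fragments.insert(c, "")
--     if fragments[-1] == "":
--         return fragments[:-1]
--
--     return fragments
--
-- def get_interior_vertices(uc_digest, g_digest):
--
--     vertices = []
--
--     for frag in uc_digest:
--         bases = break_frag(frag, ['g'])
--         if len(bases) >= 3:
--             vertices.append(bases[0])
--             vertices.append(bases[-1])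
--
--     for frag in g_digest:
--         bases = break_frag(frag, ['u', 'c'])
--         if len(bases) >= 3:
--             vertices.append(bases[0])
--             vertices.append(bases[-1])
--
--     return list(set(vertices))
-- ===== SOURCE B (Python) =====
-- def get_interior_vertices(uc_digest, g_digest):
--     vertices = []
--     for digest, seps in ((uc_digest, "g"), (g_digest, "uc")):
--         for frag in digest:
--             cuts = [i + 1 for i, ch in enumerate(frag) if ch in seps]
--             if not cuts:
--                 continue
--             trailing = cuts[-1] == len(frag)
--             n = len(cuts) + (0 if trailing else 1)
--             if n >= 3:
--                 vertices.append(frag[:cuts[0]])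
--                 vertices.append(frag[cuts[-2]:] if trailing else frag[cuts[-1]:])
--     return list(set(vertices))
-- ===== Notes on version B (the rewrite author's own statement) =====
-- stated objective: simpler
-- what changed: break_frag's incremental fragment-list construction (growing strings, list.insert, index bookkeeping, final empty-tail trim) is replaced by a per-fragment closed form: the separator cut positions from one comprehension, a piece count derived from whether the fragment ends in a separator, and the first/last pieces taken directly as slices; the outer loops and final list(set(...)) dedup are unchanged.
import Mathlib
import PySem

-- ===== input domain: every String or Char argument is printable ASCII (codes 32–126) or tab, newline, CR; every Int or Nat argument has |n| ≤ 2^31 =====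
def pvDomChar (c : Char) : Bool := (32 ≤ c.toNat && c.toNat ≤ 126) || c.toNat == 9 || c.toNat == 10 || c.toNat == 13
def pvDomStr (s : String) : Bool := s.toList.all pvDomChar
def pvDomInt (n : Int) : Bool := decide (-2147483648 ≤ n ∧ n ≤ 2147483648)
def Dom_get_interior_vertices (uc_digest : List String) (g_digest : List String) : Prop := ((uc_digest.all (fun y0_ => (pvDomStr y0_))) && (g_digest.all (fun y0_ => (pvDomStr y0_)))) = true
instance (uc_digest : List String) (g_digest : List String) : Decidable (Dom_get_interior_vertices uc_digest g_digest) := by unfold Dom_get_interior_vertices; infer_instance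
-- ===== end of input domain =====

-- B replaces A's incremental fragment-list construction (string growing, list insert, index bookkeeping)
-- by a direct closed form per fragment: the separator cut positions, a piece count, and two slices; objective: simpler.

-- ===== PORT A =====
-- the 'for singleteton in frag' loop of break_frag: state = (fragments, c)
def pvBreakLoop (search : List String) : List Char → List String → Nat → List String
  | [], fragments, _ => fragments
  | ch :: rest, fragments, c =>
    let fragments' := fragments.set c (fragments.getD c "" ++ String.ofList [ch])
    if search.contains (String.ofList [ch]) then
      pvBreakLoop search rest (PySem.List.insert fragments' ((c : Int) + 1) "") (c + 1)
    else
      pvBreakLoop search rest fragments' c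

def pvBreakFrag (frag : String) (search : List String) : List String :=
  let fragments := pvBreakLoop search frag.toList [""] 0
  if fragments.getLast? = some "" then fragments.dropLast else fragments

-- body of each 'for frag in …' iteration in A
def pvStepA (search : List String) (vertices : List String) (frag : String) : List String :=
  let bases := pvBreakFrag frag search
  if 3 ≤ bases.length then
    vertices ++ [bases.getD 0 "", PySem.List.pyGetD bases (-1) ""]
  else vertices

def get_interior_vertices (uc_digest : List String) (g_digest : List String) : List String :=
  let vertices : List String := []
  let vertices := uc_digest.foldl (pvStepA ["g"]) vertices
  let vertices := g_digest.foldl (pvStepA ["u", "c"]) vertices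
  PySem.Set.ofList vertices

-- ===== PORT B =====
-- body of each 'for frag in digest' iteration in B: cut positions + closed-form count + two slices
def pvStepB (seps : String) (vertices : List String) (frag : String) : List String :=
  let cuts := ((PySem.List.enumerate frag.toList).filter (fun p => seps.toList.contains p.2)).map
      (fun p => p.1 + 1)
  match cuts.getLast? with
  | none => vertices
  | some clast =>
    let trailing := clast == (frag.toList.length : Int)
    let n := cuts.length + (if trailing then 0 else 1)
    if 3 ≤ n then
      vertices ++ [String.ofList (PySem.List.slice frag.toList none (some (cuts.headD 0))),
        if trailing then
          String.ofList (PySem.List.slice frag.toList (some (PySem.List.pyGetD cuts (-2) 0)) none)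
        else String.ofList (PySem.List.slice frag.toList (some clast) none)]
    else vertices

def get_interior_vertices_alt (uc_digest : List String) (g_digest : List String) : List String :=
  let vertices := uc_digest.foldl (pvStepB "g") []
  let vertices := g_digest.foldl (pvStepB "uc") vertices
  PySem.Set.ofList vertices

-- ===== PRECONDITION & SPEC =====
def Spec_get_interior_vertices (uc_digest : List String) (g_digest : List String) (out : List String) : Prop := out = get_interior_vertices_alt uc_digest g_digest
instance (uc_digest : List String) (g_digest : List String) (out : List String) : Decidable (Spec_get_interior_vertices uc_digest g_digest out) := by unfold Spec_get_interior_vertices; infer_instance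

-- ===== CLAIM (what is proved, stated in full; the proofs are below) =====
def Claim_equal_get_interior_vertices : Prop := ∀ (uc_digest : List String) (g_digest : List String), Dom_get_interior_vertices uc_digest g_digest → Spec_get_interior_vertices uc_digest g_digest (get_interior_vertices uc_digest g_digest)

-- ===== LEMMAS AND PROOFS =====

-- proof model: the list of pieces break_frag builds (over chars), and the separator positions
def pvSplitC (P : Char → Bool) : List Char → List Char → List (List Char)
  | cur, [] => [cur]
  | cur, ch :: rest => if P ch then (cur ++ [ch]) :: pvSplitC P [] rest else pvSplitC P (cur ++ [ch]) rest

def pvIdx (P : Char → Bool) : List Char → Nat → List Nat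
  | [], _ => []
  | ch :: rest, s => if P ch then s :: pvIdx P rest (s + 1) else pvIdx P rest (s + 1)

theorem pvBreakLoop_eq (search : List String) (rest : List Char) :
    ∀ (fs : List String) (cur : String),
    pvBreakLoop search rest (fs ++ [cur]) fs.length
      = fs ++ (pvSplitC (fun ch => search.contains (String.ofList [ch])) cur.toList rest).map String.ofList := by
  induction rest with
  | nil =>
    intro fs cur
    simp [pvBreakLoop, pvSplitC]
  | cons ch rest ih =>
    intro fs cur
    have hset : (fs ++ [cur]).set fs.length ((fs ++ [cur]).getD fs.length "" ++ String.ofList [ch])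
        = fs ++ [cur ++ String.ofList [ch]] := by
      simp
    by_cases hp : search.contains (String.ofList [ch])
    · have hlen : ((fs.length : Int) + 1) = (((fs ++ [cur ++ String.ofList [ch]]).length : Nat) : Int) := by
        simp
      have hins : PySem.List.insert (fs ++ [cur ++ String.ofList [ch]]) ((fs.length : Int) + 1) ""
          = (fs ++ [cur ++ String.ofList [ch]]) ++ [""] := by
        rw [hlen]; exact PySem.List.insert_len _ _
      have hih := ih (fs ++ [cur ++ String.ofList [ch]]) ""
      simp only [pvBreakLoop, hset, hp, if_pos, hins]
      have hlen2 : fs.length + 1 = (fs ++ [cur ++ String.ofList [ch]]).length := by simp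
      rw [hlen2, hih]
      have hsp : pvSplitC (fun ch => search.contains (String.ofList [ch])) cur.toList (ch :: rest)
          = (cur.toList ++ [ch]) :: pvSplitC (fun ch => search.contains (String.ofList [ch])) [] rest := by
        simp only [pvSplitC]
        rw [if_pos hp]
      rw [hsp]
      simp [String.ofList_append]
    · have hih := ih fs (cur ++ String.ofList [ch])
      simp only [pvBreakLoop, hset, hp, if_neg, Bool.false_eq_true, not_false_iff]
      rw [hih]
      have hsp : pvSplitC (fun ch => search.contains (String.ofList [ch])) cur.toList (ch :: rest)
          = pvSplitC (fun ch => search.contains (String.ofList [ch])) (cur.toList ++ [ch]) rest := by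
        simp only [pvSplitC]
        rw [if_neg hp]
      rw [hsp]
      have ht : (cur ++ String.ofList [ch]).toList = cur.toList ++ [ch] := by simp
      rw [ht]

theorem pvIdx_length (P : Char → Bool) (cs : List Char) : ∀ s, (pvIdx P cs s).length = cs.countP P := by
  induction cs with
  | nil => intro s; simp [pvIdx]
  | cons ch rest ih =>
    intro s
    by_cases hp : P ch <;> simp [pvIdx, hp, List.countP_cons, ih (s + 1)]

theorem pvSplitC_length (P : Char → Bool) (cs : List Char) :
    ∀ cur, (pvSplitC P cur cs).length = cs.countP P + 1 := by
  induction cs with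
  | nil => intro cur; simp [pvSplitC]
  | cons ch rest ih =>
    intro cur
    by_cases hp : P ch <;> simp [pvSplitC, hp, List.countP_cons, ih] <;> omega

theorem pvSplitC_ne_nil (P : Char → Bool) (cs : List Char) (cur : List Char) :
    pvSplitC P cur cs ≠ [] := by
  intro hh
  have := pvSplitC_length P cs cur
  rw [hh] at this
  simp at this

theorem pvIdx_bounds (P : Char → Bool) (cs : List Char) :
    ∀ s i, i ∈ pvIdx P cs s → s ≤ i ∧ i < s + cs.length := by
  induction cs with
  | nil => intro s i h; simp [pvIdx] at h
  | cons ch rest ih =>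
    intro s i h
    by_cases hp : P ch <;> simp only [pvIdx, hp, if_pos, if_neg, Bool.false_eq_true, not_false_iff,
      List.mem_cons] at h
    · rcases h with rfl | h
      · simp <;> omega
      · have := ih (s + 1) i h; simp at this ⊢ <;> omega
    · have := ih (s + 1) i h; simp at this ⊢ <;> omega

theorem pvIdx_append (P : Char → Bool) (xs ys : List Char) :
    ∀ s, pvIdx P (xs ++ ys) s = pvIdx P xs s ++ pvIdx P ys (s + xs.length) := by
  induction xs with
  | nil => intro s; simp [pvIdx]
  | cons ch rest ih =>
    intro s
    have hc : s + 1 + rest.length = s + (rest.length + 1) := by omega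
    by_cases hp : P ch <;> simp [pvIdx, hp, ih (s + 1), hc]

theorem pvSplitC_head (P : Char → Bool) (cs : List Char) :
    ∀ s cur j J', pvIdx P cs s = j :: J' →
      (pvSplitC P cur cs).head? = some (cur ++ cs.take (j - s + 1)) := by
  induction cs with
  | nil => intro s cur j J' h; simp [pvIdx] at h
  | cons ch rest ih =>
    intro s cur j J' h
    by_cases hp : P ch
    · simp only [pvIdx, hp, if_pos, List.cons.injEq] at h
      obtain ⟨rfl, _⟩ := h
      simp [pvSplitC, hp]
    · simp only [pvIdx, hp, if_neg, Bool.false_eq_true, not_false_iff] at h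
      have hb : s + 1 ≤ j := by
        have := pvIdx_bounds P rest (s + 1) j (by rw [h]; exact List.mem_cons_self)
        omega
      have hih := ih (s + 1) (cur ++ [ch]) j J' h
      have hd : j - s + 1 = (j - (s + 1) + 1) + 1 := by omega
      simp only [pvSplitC, hp, if_neg, Bool.false_eq_true, not_false_iff, hih, hd, List.take_succ_cons]
      simp

theorem pvSplitC_nosep (P : Char → Bool) (cs : List Char) :
    ∀ s cur, pvIdx P cs s = [] → pvSplitC P cur cs = [cur ++ cs] := by
  induction cs with
  | nil => intro s cur _; simp [pvSplitC]
  | cons ch rest ih =>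
    intro s cur h
    by_cases hp : P ch
    · simp [pvIdx, hp] at h
    · simp only [pvIdx, hp, if_neg, Bool.false_eq_true, not_false_iff] at h
      simp [pvSplitC, hp, ih (s + 1) (cur ++ [ch]) h]

theorem pvSplitC_last (P : Char → Bool) (cs : List Char) :
    ∀ s cur j, (pvIdx P cs s).getLast? = some j →
      (pvSplitC P cur cs).getLast? = some (cs.drop (j - s + 1)) := by
  induction cs with
  | nil => intro s cur j h; simp [pvIdx] at h
  | cons ch rest ih =>
    intro s cur j h
    cases hr : pvIdx P rest (s + 1) with
    | nil =>
      by_cases hp : P ch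
      · simp only [pvIdx, hp, if_pos, hr] at h
        simp only [List.getLast?_singleton, Option.some.injEq] at h
        subst h
        have hrest := pvSplitC_nosep P rest (s + 1) [] hr
        simp [pvSplitC, hp, hrest]
      · simp only [pvIdx, hp, if_neg, Bool.false_eq_true, not_false_iff, hr] at h
        simp at h
    | cons j0 J0 =>
      have hlast : (pvIdx P rest (s + 1)).getLast? = some j := by
        by_cases hp : P ch
        · simp only [pvIdx, hp, if_pos, hr] at h
          rw [hr]
          simpa using h
        · simp only [pvIdx, hp, if_neg, Bool.false_eq_true, not_false_iff, hr] at h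
          rw [hr]; exact h
      have hb : s + 1 ≤ j := by
        have hm : j ∈ pvIdx P rest (s + 1) := by
          rcases List.getLast?_eq_some_iff.mp hlast with ⟨ys, hys⟩
          rw [hys]; simp
        have := pvIdx_bounds P rest (s + 1) j hm
        omega
      have hd : (ch :: rest).drop (j - s + 1) = rest.drop (j - (s + 1) + 1) := by
        have : j - s + 1 = (j - (s + 1) + 1) + 1 := by omega
        rw [this, List.drop_succ_cons]
      rw [hd]
      by_cases hp : P ch
      · have hih := ih (s + 1) [] j hlast
        rcases hx : pvSplitC P [] rest with _ | ⟨y, ys⟩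
        · exact absurd hx (pvSplitC_ne_nil P rest [])
        · rw [hx] at hih
          simp only [pvSplitC, hp, if_pos, hx, List.getLast?_cons_cons]
          exact hih
      · have hih := ih (s + 1) (cur ++ [ch]) j hlast
        simp only [pvSplitC, hp, if_neg, Bool.false_eq_true, not_false_iff]
        exact hih

theorem pvSplitC_snoc_sep (P : Char → Bool) (cs : List Char) (ch : Char) (hch : P ch = true) :
    ∀ cur, pvSplitC P cur (cs ++ [ch])
      = (pvSplitC P cur cs).dropLast ++ [((pvSplitC P cur cs).getLast?.getD []) ++ [ch], []] := by
  induction cs with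
  | nil => intro cur; simp [pvSplitC, hch]
  | cons c' rest ih =>
    intro cur
    by_cases hp : P c'
    · rcases hx : pvSplitC P [] rest with _ | ⟨y, ys⟩
      · exact absurd hx (pvSplitC_ne_nil P rest [])
      · simp only [List.cons_append, pvSplitC, hp, if_pos, ih []]
        rw [hx]
        simp
    · simp only [List.cons_append, pvSplitC, hp, if_neg, Bool.false_eq_true, not_false_iff]
      exact ih (cur ++ [c'])

theorem pvEnum_idx (f : Char → Bool) (cs : List Char) :
    ∀ s : Nat, ((PySem.List.enumerate cs (s : Int)).filter (fun p => f p.2)).map (fun p => p.1 + 1)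
      = (pvIdx f cs s).map (fun i => ((i : Nat) : Int) + 1) := by
  induction cs with
  | nil => intro s; simp [PySem.List.enumerate_nil, pvIdx]
  | cons ch rest ih =>
    intro s
    rw [PySem.List.enumerate_cons]
    have hc : ((s : Int) + 1) = (((s + 1 : Nat) : Nat) : Int) := by push_cast; ring
    by_cases hp : f ch
    · rw [List.filter_cons_of_pos (by exact hp), List.map_cons, hc, ih (s + 1)]
      simp [pvIdx, hp]
    · rw [List.filter_cons_of_neg (by simpa using hp), hc, ih (s + 1)]
      simp [pvIdx, hp]

theorem pv_ofList_ne_empty (l : List Char) (h : l ≠ []) : String.ofList l ≠ "" := by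
  intro hh
  apply h
  have h2 : String.ofList l = String.ofList [] := hh
  exact String.ofList_inj.mp h2

theorem pv_sliceTo (xs : List Char) (j : Nat) :
    PySem.List.slice xs none (some (((j : Nat) : Int) + 1)) = xs.take (j + 1) := by
  have hc : (((j : Nat) : Int) + 1) = (((j + 1 : Nat) : Nat) : Int) := by push_cast; ring
  rw [hc, PySem.List.slice_to_natCast]

theorem pv_sliceFrom (xs : List Char) (j : Nat) :
    PySem.List.slice xs (some (((j : Nat) : Int) + 1)) none = xs.drop (j + 1) := by
  have hc : (((j : Nat) : Int) + 1) = (((j + 1 : Nat) : Nat) : Int) := by push_cast; ring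
  rw [hc, PySem.List.slice_from_natCast]

theorem pv_core (P : Char → Bool) (cs : List Char) (vertices : List String) :
    (let fragments := (pvSplitC P [] cs).map String.ofList
     let bases := if fragments.getLast? = some "" then fragments.dropLast else fragments
     if 3 ≤ bases.length then vertices ++ [bases.getD 0 "", PySem.List.pyGetD bases (-1) ""]
     else vertices)
    =
    (let cuts := (pvIdx P cs 0).map (fun i => ((i : Nat) : Int) + 1)
     match cuts.getLast? with
     | none => vertices
     | some clast =>
       let trailing := clast == (cs.length : Int)
       let n := cuts.length + (if trailing then 0 else 1)
       if 3 ≤ n then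
         vertices ++ [String.ofList (PySem.List.slice cs none (some (cuts.headD 0))),
           if trailing then String.ofList (PySem.List.slice cs (some (PySem.List.pyGetD cuts (-2) 0)) none)
           else String.ofList (PySem.List.slice cs (some clast) none)]
       else vertices) := by
  rcases List.eq_nil_or_concat cs with rfl | ⟨cs', ch, rfl⟩
  · simp [pvSplitC, pvIdx]
  · simp only [List.concat_eq_append]
    have hJ : pvIdx P (cs' ++ [ch]) 0 = pvIdx P cs' 0 ++ (if P ch then [cs'.length] else []) := by
      rw [pvIdx_append]
      congr 1
      by_cases hp : P ch <;> simp [pvIdx, hp]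
    by_cases hp : P ch
    · rw [if_pos hp] at hJ
      cases hJ' : pvIdx P cs' 0 with
      | nil =>
        rw [hJ'] at hJ
        have hq := pvSplitC_nosep P cs' 0 [] hJ'
        have hps : pvSplitC P [] (cs' ++ [ch]) = [cs' ++ [ch], []] := by
          rw [pvSplitC_snoc_sep P cs' ch hp [], hq]
          simp
        rw [hps, hJ]
        simp only [List.nil_append, List.map_cons, List.map_nil]
        norm_num [List.getLast?_concat]
      | cons j0 Jt =>
        rw [hJ'] at hJ
        -- jl := last separator position inside cs'
        obtain ⟨jl, hjl⟩ : ∃ jl, (j0 :: Jt).getLast? = some jl := by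
          cases h : (j0 :: Jt).getLast? with
          | none => simp [List.getLast?_eq_none_iff] at h
          | some v => exact ⟨v, rfl⟩
        have hjl_mem : jl ∈ pvIdx P cs' 0 := by
          rcases List.getLast?_eq_some_iff.mp hjl with ⟨ys, hys⟩
          rw [hJ', hys]; simp
        have hjl_lt : jl < cs'.length := by
          have := pvIdx_bounds P cs' 0 jl hjl_mem; omega
        have hj0_lt : j0 < cs'.length := by
          have := pvIdx_bounds P cs' 0 j0 (by rw [hJ']; exact List.mem_cons_self); omega
        have hq_last : (pvSplitC P [] cs').getLast? = some (cs'.drop (jl + 1)) := by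
          have h0 := pvSplitC_last P cs' 0 [] jl (by rw [hJ']; exact hjl)
          simpa using h0
        have hq_head : (pvSplitC P [] cs').head? = some (cs'.take (j0 + 1)) := by
          have h0 := pvSplitC_head P cs' 0 [] j0 Jt hJ'
          simpa using h0
        have hps : pvSplitC P [] (cs' ++ [ch])
            = (pvSplitC P [] cs').dropLast ++ [cs'.drop (jl + 1) ++ [ch], []] := by
          rw [pvSplitC_snoc_sep P cs' ch hp [], hq_last]
          rfl
        have hqlen : (pvSplitC P [] cs').length = Jt.length + 2 := by
          rw [pvSplitC_length, ← pvIdx_length P cs' 0, hJ']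
          simp
        obtain ⟨q0, qrest, hqeq⟩ : ∃ a t, pvSplitC P [] cs' = a :: t := by
          cases hq : pvSplitC P [] cs' with
          | nil => exact absurd hq (pvSplitC_ne_nil P cs' [])
          | cons a t => exact ⟨a, t, rfl⟩
        have hq0 : q0 = cs'.take (j0 + 1) := by
          rw [hqeq] at hq_head; simpa using hq_head
        rw [hps, hJ]
        -- A-side fragments and bases
        have hfrag : ((pvSplitC P [] cs').dropLast ++ [cs'.drop (jl + 1) ++ [ch], []]).map String.ofList
            = ((pvSplitC P [] cs').dropLast.map String.ofList
                ++ [String.ofList (cs'.drop (jl + 1) ++ [ch])]) ++ [""] := by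
          simp
        have hifc : ((List.map String.ofList (pvSplitC P [] cs').dropLast
            ++ [String.ofList (List.drop (jl + 1) cs' ++ [ch])]) ++ [""]).getLast? = some "" :=
          List.getLast?_concat
        rw [hfrag, if_pos hifc, List.dropLast_concat]
        -- B-side cuts
        have hcuts : ((j0 :: Jt) ++ [cs'.length]).map (fun i => ((i : Nat) : Int) + 1)
            = ((j0 : Int) + 1) :: (Jt.map (fun i => ((i : Nat) : Int) + 1) ++ [((cs'.length : Int) + 1)]) := by
          simp
        rw [hcuts]
        have htr : (((cs'.length : Int) + 1) == (((cs' ++ [ch]).length : Nat) : Int)) = true := by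
          rw [beq_iff_eq]; push_cast; simp
        have hA1 : (((pvSplitC P [] cs').dropLast.map String.ofList
            ++ [String.ofList (cs'.drop (jl + 1) ++ [ch])])).getD 0 ""
            = String.ofList (cs'.take (j0 + 1)) := by
          rcases qrest with _ | ⟨q1, qrest2⟩
          · rw [hqeq] at hqlen; simp at hqlen
          · rw [hqeq, hq0]
            simp [List.dropLast]
        have hA2 : PySem.List.pyGetD ((pvSplitC P [] cs').dropLast.map String.ofList
            ++ [String.ofList (cs'.drop (jl + 1) ++ [ch])]) (-1) ""
            = String.ofList (cs'.drop (jl + 1) ++ [ch]) := by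
          rw [PySem.List.pyGetD_neg_one_append_singleton]
        have hB1 : PySem.List.slice (cs' ++ [ch]) none (some ((((j0 : Int) + 1)
              :: (Jt.map (fun i => ((i : Nat) : Int) + 1) ++ [((cs'.length : Int) + 1)])).headD 0))
            = cs'.take (j0 + 1) := by
          simp only [List.headD_cons]
          rw [pv_sliceTo, List.take_append_of_le_length (by omega)]
        obtain ⟨J2, hJ2⟩ : ∃ t, j0 :: Jt = t ++ [jl] := List.getLast?_eq_some_iff.mp hjl
        have hB2 : PySem.List.pyGetD (((j0 : Int) + 1)
              :: (Jt.map (fun i => ((i : Nat) : Int) + 1) ++ [((cs'.length : Int) + 1)])) (-2) 0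
            = ((jl : Int) + 1) := by
          have hx : (((j0 : Int) + 1) :: (Jt.map (fun i => ((i : Nat) : Int) + 1)
                ++ [((cs'.length : Int) + 1)]))
              = (J2.map (fun i => ((i : Nat) : Int) + 1) ++ [((jl : Int) + 1)])
                ++ [((cs'.length : Int) + 1)] := by
            have h1 : ((j0 :: Jt).map (fun i => ((i : Nat) : Int) + 1))
                = (J2 ++ [jl]).map (fun i => ((i : Nat) : Int) + 1) := by rw [← hJ2]
            have h2 := congrArg (fun l => l ++ [((cs'.length : Int) + 1)]) h1
            simpa using h2
          rw [hx, PySem.List.pyGetD_neg_ofNat _ 2 0 (by omega) (by simp)]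
          simp
        have hB3 : PySem.List.slice (cs' ++ [ch]) (some ((jl : Int) + 1)) none
            = cs'.drop (jl + 1) ++ [ch] := by
          rw [pv_sliceFrom, List.drop_append_of_le_length (by omega)]
        cases hgl : ((((j0 : Int) + 1) :: (Jt.map (fun i => ((i : Nat) : Int) + 1)
            ++ [((cs'.length : Int) + 1)])).getLast?) with
        | none =>
          rw [← List.cons_append, List.getLast?_concat] at hgl
          exact absurd hgl (by simp)
        | some clast =>
          have hclast : clast = ((cs'.length : Int) + 1) := by
            rw [← List.cons_append, List.getLast?_concat] at hgl
            exact (Option.some.inj hgl).symm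
          subst hclast
          simp only [htr, eq_self_iff_true, if_true]
          rw [hA1, hA2, hB1, hB2, hB3]
          simp only [List.length_cons, List.length_append, List.length_map,
            List.length_dropLast, List.length_nil, hqlen, Nat.add_zero]
          try norm_num
          try split_ifs
          all_goals first | rfl | omega
    · rw [if_neg hp] at hJ
      simp only [List.append_nil] at hJ
      cases hJ' : pvIdx P cs' 0 with
      | nil =>
        rw [hJ'] at hJ
        have hps := pvSplitC_nosep P (cs' ++ [ch]) 0 [] hJ
        rw [hps, hJ]
        simp only [List.map_nil, List.map_cons, List.nil_append, List.getLast?_singleton,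
          Option.some.injEq]
        have hne2 : ¬ (String.ofList (cs' ++ [ch]) = "") := pv_ofList_ne_empty _ (by simp)
        rw [if_neg hne2]
        simp
      | cons j0 Jt =>
        rw [hJ'] at hJ
        obtain ⟨jl, hjl⟩ : ∃ jl, (j0 :: Jt).getLast? = some jl := by
          cases h : (j0 :: Jt).getLast? with
          | none => simp [List.getLast?_eq_none_iff] at h
          | some v => exact ⟨v, rfl⟩
        have hjl_mem : jl ∈ pvIdx P cs' 0 := by
          rcases List.getLast?_eq_some_iff.mp hjl with ⟨ys, hys⟩
          rw [hJ', hys]; simp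
        have hjl_lt : jl < cs'.length := by
          have := pvIdx_bounds P cs' 0 jl hjl_mem; omega
        have hj0_lt : j0 < cs'.length := by
          have := pvIdx_bounds P cs' 0 j0 (by rw [hJ']; exact List.mem_cons_self); omega
        have hq_last : (pvSplitC P [] (cs' ++ [ch])).getLast?
            = some ((cs' ++ [ch]).drop (jl + 1)) := by
          have h0 := pvSplitC_last P (cs' ++ [ch]) 0 [] jl (by rw [hJ]; exact hjl)
          simpa using h0
        have hdrop_ne : (cs' ++ [ch]).drop (jl + 1) ≠ [] := by
          intro h
          have := congrArg List.length h
          simp at this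
          omega
        have hq_head : (pvSplitC P [] (cs' ++ [ch])).head? = some ((cs' ++ [ch]).take (j0 + 1)) := by
          have h0 := pvSplitC_head P (cs' ++ [ch]) 0 [] j0 Jt hJ
          simpa using h0
        have hqlen : (pvSplitC P [] (cs' ++ [ch])).length = Jt.length + 2 := by
          rw [pvSplitC_length, ← pvIdx_length P (cs' ++ [ch]) 0, hJ]
          simp
        rw [hJ]
        -- A side: the last fragment is nonempty, so nothing is dropped
        have hifneg : ¬ (((pvSplitC P [] (cs' ++ [ch])).map String.ofList).getLast? = some "") := by
          rw [List.getLast?_map, hq_last]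
          simp only [Option.map_some, Option.some.injEq]
          exact pv_ofList_ne_empty _ hdrop_ne
        rw [if_neg hifneg]
        have hlenL : ((pvSplitC P [] (cs' ++ [ch])).map String.ofList).length = Jt.length + 2 := by
          simp [hqlen]
        have hA1 : ((pvSplitC P [] (cs' ++ [ch])).map String.ofList).getD 0 ""
            = String.ofList ((cs' ++ [ch]).take (j0 + 1)) := by
          obtain ⟨p0, pt, hpeq⟩ : ∃ a t, pvSplitC P [] (cs' ++ [ch]) = a :: t := by
            cases hq : pvSplitC P [] (cs' ++ [ch]) with
            | nil => exact absurd hq (pvSplitC_ne_nil P (cs' ++ [ch]) [])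
            | cons a t => exact ⟨a, t, rfl⟩
          rw [hpeq] at hq_head
          simp only [List.head?_cons, Option.some.injEq] at hq_head
          rw [hpeq, hq_head]
          simp
        have hA2 : PySem.List.pyGetD ((pvSplitC P [] (cs' ++ [ch])).map String.ofList) (-1) ""
            = String.ofList ((cs' ++ [ch]).drop (jl + 1)) := by
          obtain ⟨ps0, hps0⟩ : ∃ t, pvSplitC P [] (cs' ++ [ch]) = t ++ [(cs' ++ [ch]).drop (jl + 1)] :=
            List.getLast?_eq_some_iff.mp hq_last
          rw [hps0, List.map_append, List.map_singleton]
          rw [PySem.List.pyGetD_neg_one_append_singleton]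
        -- B side
        have hcuts : (j0 :: Jt).map (fun i => ((i : Nat) : Int) + 1)
            = ((j0 : Int) + 1) :: Jt.map (fun i => ((i : Nat) : Int) + 1) := by
          simp
        rw [hcuts]
        have hgl0 : (((j0 : Int) + 1) :: Jt.map (fun i => ((i : Nat) : Int) + 1)).getLast?
            = some ((jl : Int) + 1) := by
          rw [← hcuts, List.getLast?_map, hjl]
          rfl
        cases hgl : ((((j0 : Int) + 1) :: Jt.map (fun i => ((i : Nat) : Int) + 1)).getLast?) with
        | none => rw [hgl0] at hgl; exact absurd hgl (by simp)
        | some clast =>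
          have hclast : clast = ((jl : Int) + 1) := by
            rw [hgl0] at hgl
            exact (Option.some.inj hgl).symm
          subst hclast
          have htr : ((((jl : Nat) : Int) + 1) == (((cs' ++ [ch]).length : Nat) : Int)) = false := by
            rw [beq_eq_false_iff_ne]
            intro hh
            have h2 : jl + 1 = (cs' ++ [ch]).length := by exact_mod_cast hh
            simp at h2
            omega
          have hB1 : PySem.List.slice (cs' ++ [ch]) none (some ((((j0 : Int) + 1)
                :: Jt.map (fun i => ((i : Nat) : Int) + 1)).headD 0))
              = (cs' ++ [ch]).take (j0 + 1) := by
            simp only [List.headD_cons]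
            rw [pv_sliceTo]
          have hB3 : PySem.List.slice (cs' ++ [ch]) (some ((jl : Int) + 1)) none
              = (cs' ++ [ch]).drop (jl + 1) := by
            rw [pv_sliceFrom]
          simp only [htr, Bool.false_eq_true, if_false]
          rw [hA1, hA2, hB1, hB3]
          rw [hlenL]
          simp only [List.length_cons, List.length_append, List.length_map,
            List.length_dropLast, List.length_nil, hqlen, Nat.add_zero]
          try norm_num
          try split_ifs
          all_goals first | rfl | omega

theorem pvStep_eq (search : List String) (seps : String)
    (hs : ∀ ch, search.contains (String.ofList [ch]) = seps.toList.contains ch)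
    (vertices : List String) (frag : String) :
    pvStepA search vertices frag = pvStepB seps vertices frag := by
  have hP : (fun ch => search.contains (String.ofList [ch])) = (fun ch => seps.toList.contains ch) :=
    funext hs
  have hloop : pvBreakLoop search frag.toList [""] 0
      = (pvSplitC (fun ch => seps.toList.contains ch) [] frag.toList).map String.ofList := by
    have h0 := pvBreakLoop_eq search frag.toList [] ""
    rw [hP] at h0
    simpa using h0
  have hcuts : ((PySem.List.enumerate frag.toList).filter (fun p => seps.toList.contains p.2)).map
        (fun p => p.1 + 1)
      = (pvIdx (fun ch => seps.toList.contains ch) frag.toList 0).map (fun i => ((i : Nat) : Int) + 1) := by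
    have h0 := pvEnum_idx (fun ch => seps.toList.contains ch) frag.toList 0
    simpa using h0
  have hc := pv_core (fun ch => seps.toList.contains ch) frag.toList vertices
  unfold pvStepA pvStepB pvBreakFrag
  rw [hloop, hcuts]
  exact hc

-- ===== VERDICT (by name: the statement is the Claim_ definition above) =====
theorem get_interior_vertices_spec : Claim_equal_get_interior_vertices := by
  intro uc g _
  unfold Spec_get_interior_vertices get_interior_vertices get_interior_vertices_alt
  have hchr : ∀ (t : String) (c : Char) (ch : Char), t = String.ofList [c] → ch ≠ c →
      ((String.ofList [ch] == t) = false) := by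
    intro t c ch ht hne
    rw [ht, beq_eq_false_iff_ne]
    intro hh
    exact hne (by simpa using String.ofList_inj.mp hh)
  have h1 : ∀ ch, (["g"] : List String).contains (String.ofList [ch]) = "g".toList.contains ch := by
    intro ch
    by_cases h : ch = 'g'
    · subst h; decide
    · have e1 := hchr "g" 'g' ch rfl h
      have e2 : ("g".toList.contains ch) = false := by
        rw [show "g".toList = ['g'] by decide]
        show ((ch == 'g') || false) = false
        rw [Bool.or_false, beq_eq_false_iff_ne]
        exact h
      show ((String.ofList [ch] == "g") || false) = ("g".toList.contains ch)
      rw [Bool.or_false, e1, e2]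
  have h2 : ∀ ch, (["u", "c"] : List String).contains (String.ofList [ch]) = "uc".toList.contains ch := by
    intro ch
    by_cases hu : ch = 'u'
    · subst hu; decide
    · by_cases hc : ch = 'c'
      · subst hc; decide
      · have eu := hchr "u" 'u' ch rfl hu
        have ec := hchr "c" 'c' ch rfl hc
        have e2 : ("uc".toList.contains ch) = false := by
          rw [show "uc".toList = ['u', 'c'] by decide]
          show ((ch == 'u') || ((ch == 'c') || false)) = false
          rw [Bool.or_false, beq_eq_false_iff_ne.mpr hu, beq_eq_false_iff_ne.mpr hc]
          rfl
        show ((String.ofList [ch] == "u") || ((String.ofList [ch] == "c") || false))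
            = ("uc".toList.contains ch)
        rw [Bool.or_false, eu, ec, e2]
        rfl
  have f1 : pvStepA ["g"] = pvStepB "g" :=
    funext fun a => funext fun x => pvStep_eq _ _ h1 a x
  have f2 : pvStepA ["u", "c"] = pvStepB "uc" :=
    funext fun a => funext fun x => pvStep_eq _ _ h2 a x
  rw [f1, f2]
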